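-- pv_equiv track=rewrite | github.com/nikolasavic/algorithms | dynamic_programming/three-chain.py | total_3_chains
-- ===== SOURCE A (Python) =====
-- def total_3_chains(arr):
--     n = len(arr)
--     dp = [0 for _ in range(n)]
--     dp[0] = 1
--
--     for i in range(1, n):
--         for j in range(i):
--             if abs(arr[i] - arr[j]) <= 3:
--                 dp[i] += dp[j]
--
--     return dp[-1]
-- ===== SOURCE B (Python) =====
-- def total_3_chains(arr):
--     sums = {arr[0]: 1}
--     last = 1
--     for x in arr[1:]:
--         last = sum(sums.get(x + k, 0) for k in range(-3, 4))
--         sums[x] = sums.get(x, 0) + last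
--     return last
-- ===== Notes on version B (the rewrite author's own statement) =====
-- stated objective: faster
-- what changed: Replaces the O(n^2) all-previous-indices dp scan with a single left-to-right pass that keeps a dict mapping each value to the sum of dp over elements with that value, so each new dp is the sum of 7 dict lookups over arr[i]-3..arr[i]+3.
import Mathlib
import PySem

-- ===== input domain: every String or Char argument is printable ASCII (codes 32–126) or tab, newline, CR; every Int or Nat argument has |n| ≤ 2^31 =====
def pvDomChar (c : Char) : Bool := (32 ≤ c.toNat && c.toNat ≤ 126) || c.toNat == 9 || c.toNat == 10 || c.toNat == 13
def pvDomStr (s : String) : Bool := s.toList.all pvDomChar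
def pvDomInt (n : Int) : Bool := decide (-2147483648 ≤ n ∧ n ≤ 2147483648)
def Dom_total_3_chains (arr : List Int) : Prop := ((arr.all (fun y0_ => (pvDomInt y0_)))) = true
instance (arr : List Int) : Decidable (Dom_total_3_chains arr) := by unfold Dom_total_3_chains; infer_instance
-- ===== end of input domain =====

-- B replaces A's O(n^2) pairwise dp scan with one pass keeping a dict
-- value ↦ (sum of dp over earlier elements with that value); each dp is 7 dict lookups.

-- ===== PORT A =====
def total_3_chains (arr : List Int) : Int :=
  let n : Int := arr.length
  let dp : List Int := (PySem.List.pyRange 0 n 1).map (fun _ => (0 : Int))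
  let dp : List Int := PySem.List.pySetD dp 0 1   -- dp[0] = 1 (IndexError when arr = [], excluded by Pre_)
  let dp : List Int := (PySem.List.pyRange 1 n 1).foldl (fun dp i =>
    (PySem.List.pyRange 0 i 1).foldl (fun dp j =>
      if |PySem.List.pyGetD arr i 0 - PySem.List.pyGetD arr j 0| ≤ 3 then
        PySem.List.pySetD dp i (PySem.List.pyGetD dp i 0 + PySem.List.pyGetD dp j 0)
      else dp) dp) dp
  PySem.List.pyGetD dp (-1) 0

-- ===== PORT B =====
def total_3_chains_alt (arr : List Int) : Int :=
  let sums : PySem.Dict Int Int :=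
    PySem.Dict.empty.insert (PySem.List.pyGetD arr 0 0) 1   -- {arr[0]: 1} (IndexError when arr = [], excluded by Pre_)
  let st : PySem.Dict Int Int × Int :=
    (PySem.List.slice arr (some 1) none).foldl (fun (st : PySem.Dict Int Int × Int) x =>
      let last : Int := ((PySem.List.pyRange (-3) 4 1).map (fun k => st.1.getD (x + k) 0)).sum
      (st.1.insert x (st.1.getD x 0 + last), last)) (sums, 1)
  st.2

-- ===== PRECONDITION & SPEC =====
-- A raises IndexError on the empty list (dp[0] = 1); Pre_ excludes exactly that input.
def Pre_total_3_chains (arr : List Int) : Prop := arr ≠ []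
instance (arr : List Int) : Decidable (Pre_total_3_chains arr) := by unfold Pre_total_3_chains; infer_instance
def pvWitness_total_3_chains : List Int := [1, 2, 5]
def Spec_total_3_chains (arr : List Int) (out : Int) : Prop := out = total_3_chains_alt arr
instance (arr : List Int) (out : Int) : Decidable (Spec_total_3_chains arr out) := by unfold Spec_total_3_chains; infer_instance

-- ===== CLAIM (what is proved, stated in full; the proofs are below) =====
def Claim_equal_total_3_chains : Prop := ∀ (arr : List Int), Dom_total_3_chains arr → Pre_total_3_chains arr → Spec_total_3_chains arr (total_3_chains arr)

-- ===== LEMMAS AND PROOFS =====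

-- Shared mathematical model: the list of (value, dp-value) pairs in input order.
def near3 (L : List (Int × Int)) (x : Int) : Int :=
  ((L.filter (fun p => decide (|x - p.1| ≤ 3))).map (·.2)).sum

def g3 (L : List (Int × Int)) (v : Int) : Int :=
  ((L.filter (fun p => p.1 == v)).map (·.2)).sum

def step3 (L : List (Int × Int)) (x : Int) : List (Int × Int) := L ++ [(x, near3 L x)]

def pairs3 (a : Int) (t : List Int) : List (Int × Int) := t.foldl step3 [(a, 1)]

def lastDp (L : List (Int × Int)) : Int := PySem.List.pyGetD (L.map (·.2)) (-1) 0

theorem g3_append_singleton (L : List (Int × Int)) (p : Int × Int) (v : Int) :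
    g3 (L ++ [p]) v = g3 L v + (if p.1 = v then p.2 else 0) := by
  simp [g3, List.filter_append]
  split_ifs with h <;> simp [h]

theorem g3_cons (q : Int × Int) (L : List (Int × Int)) (v : Int) :
    g3 (q :: L) v = (if q.1 = v then q.2 else 0) + g3 L v := by
  simp [g3, List.filter_cons]
  split_ifs with h <;> simp

theorem near3_append_singleton (L : List (Int × Int)) (p : Int × Int) (x : Int) :
    near3 (L ++ [p]) x = near3 L x + (if |x - p.1| ≤ 3 then p.2 else 0) := by
  by_cases h : |x - p.1| ≤ 3 <;> simp [near3, List.filter_append, h]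

theorem near3_cons (q : Int × Int) (L : List (Int × Int)) (x : Int) :
    near3 (q :: L) x = (if |x - q.1| ≤ 3 then q.2 else 0) + near3 L x := by
  by_cases h : |x - q.1| ≤ 3 <;> simp [near3, h]

-- B's 7-window sum over the value dict is the within-3 filtered sum.
theorem sum7 (L : List (Int × Int)) (x : Int) (f : Int → Int) (hf : ∀ v, f v = g3 L v) :
    ((PySem.List.pyRange (-3) 4 1).map (fun k => f (x + k))).sum = near3 L x := by
  have hr : PySem.List.pyRange (-3) 4 1 = [-3, -2, -1, 0, 1, 2, 3] := by decide
  rw [hr]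
  simp only [List.map, List.sum_cons, List.sum_nil, hf]
  clear hf
  induction L with
  | nil => simp [g3, near3]
  | cons q t ih =>
    simp only [g3_cons, near3_cons]
    rw [← ih]
    simp only [abs_le]
    split_ifs <;> omega

theorem lastDp_append (L : List (Int × Int)) (p : Int × Int) :
    lastDp (L ++ [p]) = p.2 := by
  simp [lastDp, PySem.List.pyGetD, PySem.List.pyGet?, PySem.List.pyIdx?]

theorem foldl_step3_fst (t : List Int) :
    ∀ L : List (Int × Int), (t.foldl step3 L).map (·.1) = L.map (·.1) ++ t := by
  induction t with
  | nil => simp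
  | cons x t ih => intro L; simp only [List.foldl_cons]; rw [ih]; simp [step3]

theorem foldl_step3_len (t : List Int) :
    ∀ L : List (Int × Int), (t.foldl step3 L).length = L.length + t.length := by
  induction t with
  | nil => simp
  | cons x t ih => intro L; simp only [List.foldl_cons]; rw [ih]; simp [step3]; omega

-- A's inner j-loop only rewrites cell i: it is one set of cell i to old + filtered sum.
theorem A_inner (arr : List Int) (i : Nat) :
    ∀ (js : List Int) (dp : List Int), i < dp.length →
    (∀ j ∈ js, ∃ jn : Nat, j = (jn : Int) ∧ jn < i) →
    js.foldl (fun dp j => if |PySem.List.pyGetD arr (i : Int) 0 - PySem.List.pyGetD arr j 0| ≤ 3 then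
        PySem.List.pySetD dp (i : Int) (PySem.List.pyGetD dp (i : Int) 0 + PySem.List.pyGetD dp j 0) else dp) dp
    = PySem.List.pySetD dp (i : Int) (PySem.List.pyGetD dp (i : Int) 0 +
        ((js.filter (fun j => decide (|PySem.List.pyGetD arr (i : Int) 0 - PySem.List.pyGetD arr j 0| ≤ 3))).map
          (fun j => PySem.List.pyGetD dp j 0)).sum) := by
  intro js
  induction js with
  | nil =>
    intro dp hi _
    simp only [List.foldl_nil, List.filter_nil, List.map_nil, List.sum_nil, add_zero]
    rw [PySem.List.pySetD_of_nonneg _ _ (Int.natCast_nonneg i), PySem.List.pyGetD_natCast,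
      Int.toNat_natCast, List.getD_eq_getElem _ _ hi, List.set_getElem_self]
  | cons j js ih =>
    intro dp hi hjs
    obtain ⟨jn, rfl, hjn⟩ := hjs _ (List.mem_cons_self ..)
    have hrest : ∀ j ∈ js, ∃ jn : Nat, j = (jn : Int) ∧ jn < i :=
      fun j hj => hjs j (List.mem_cons_of_mem _ hj)
    simp only [List.foldl_cons]
    by_cases hc : |PySem.List.pyGetD arr (i : Int) 0 - PySem.List.pyGetD arr (jn : Int) 0| ≤ 3
    · rw [if_pos hc]
      rw [ih _ (by rw [PySem.List.length_pySetD]; exact hi) hrest]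
      have hgets : ∀ j' ∈ js.filter (fun j => decide (|PySem.List.pyGetD arr (i : Int) 0 - PySem.List.pyGetD arr j 0| ≤ 3)),
          PySem.List.pyGetD (PySem.List.pySetD dp (i : Int) (PySem.List.pyGetD dp (i : Int) 0 + PySem.List.pyGetD dp (jn : Int) 0)) j' 0
            = PySem.List.pyGetD dp j' 0 := by
        intro j' hj'
        obtain ⟨jn', rfl, hjn'⟩ := hrest _ (List.mem_of_mem_filter hj')
        rw [PySem.List.pyGetD_pySetD_natCast _ _ _ _ _ hi, if_neg (by omega)]
      rw [List.map_congr_left hgets]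
      rw [PySem.List.pyGetD_pySetD_natCast _ _ _ _ _ hi, if_pos rfl]
      rw [List.filter_cons_of_pos (by simpa using hc), List.map_cons, List.sum_cons]
      rw [PySem.List.pySetD_of_nonneg _ _ (Int.natCast_nonneg i),
        PySem.List.pySetD_of_nonneg _ _ (Int.natCast_nonneg i),
        PySem.List.pySetD_of_nonneg _ _ (Int.natCast_nonneg i), List.set_set]
      rw [add_assoc]
    · rw [if_neg hc, List.filter_cons_of_neg (by simpa using hc)]
      exact ih dp hi hrest

-- index-sum over a pair list equals the value-filtered sum
theorem sum_idx (P : List (Int × Int)) (x : Int) :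
    (((PySem.List.pyRange 0 (P.length : Int) 1).filter
        (fun j => decide (|x - PySem.List.pyGetD (P.map (·.1)) j 0| ≤ 3))).map
      (fun j => PySem.List.pyGetD (P.map (·.2)) j 0)).sum = near3 P x := by
  induction P using List.reverseRecOn with
  | nil => simp [near3, PySem.List.pyRange_one_eq_nil]
  | append_singleton P p ih =>
    have hlen : (((P ++ [p]).length : Nat) : Int) = (P.length : Int) + 1 := by simp
    rw [hlen, PySem.List.pyRange_one_succ_right (Int.natCast_nonneg _), List.filter_append,
      List.map_append, List.sum_append]
    have h1 : (PySem.List.pyRange 0 (P.length : Int) 1).filter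
          (fun j => decide (|x - PySem.List.pyGetD ((P ++ [p]).map (·.1)) j 0| ≤ 3))
        = (PySem.List.pyRange 0 (P.length : Int) 1).filter
          (fun j => decide (|x - PySem.List.pyGetD (P.map (·.1)) j 0| ≤ 3)) := by
      apply List.filter_congr
      intro j hj
      rw [PySem.List.mem_pyRange_one] at hj
      have hj' : j = ((j.toNat : Nat) : Int) := by omega
      rw [hj', PySem.List.pyGetD_natCast, PySem.List.pyGetD_natCast, List.map_append,
        List.getD_append _ _ _ _ (by simp; omega)]
    rw [h1]
    have h2 : ∀ j ∈ (PySem.List.pyRange 0 (P.length : Int) 1).filter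
          (fun j => decide (|x - PySem.List.pyGetD (P.map (·.1)) j 0| ≤ 3)),
        PySem.List.pyGetD ((P ++ [p]).map (·.2)) j 0 = PySem.List.pyGetD (P.map (·.2)) j 0 := by
      intro j hj
      have hj2 := List.mem_of_mem_filter hj
      rw [PySem.List.mem_pyRange_one] at hj2
      have hj' : j = ((j.toNat : Nat) : Int) := by omega
      rw [hj', PySem.List.pyGetD_natCast, PySem.List.pyGetD_natCast, List.map_append,
        List.getD_append _ _ _ _ (by simp; omega)]
    rw [List.map_congr_left h2, ih, near3_append_singleton]
    by_cases hc : |x - p.1| ≤ 3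
    · rw [List.filter_cons_of_pos (by simp [hc]), if_pos hc]
      simp
    · rw [List.filter_cons_of_neg (by simp [hc]), if_neg hc]
      simp

-- A's outer loop builds exactly the model dp values of the processed prefix.
theorem A_outer (a : Int) (t : List Int) :
    ∀ (m : Nat), m ≤ t.length →
    (PySem.List.pyRange 1 ((m : Int) + 1) 1).foldl
      (fun dp i => (PySem.List.pyRange 0 i 1).foldl
        (fun dp j => if |PySem.List.pyGetD (a :: t) i 0 - PySem.List.pyGetD (a :: t) j 0| ≤ 3 then
            PySem.List.pySetD dp i (PySem.List.pyGetD dp i 0 + PySem.List.pyGetD dp j 0) else dp) dp)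
      (1 :: List.replicate t.length 0)
    = (pairs3 a (t.take m)).map (·.2) ++ List.replicate (t.length - m) (0 : Int) := by
  intro m
  induction m with
  | zero =>
    intro _
    rw [PySem.List.pyRange_one_eq_nil (by norm_num)]
    simp [pairs3]
  | succ m ih =>
    intro hm1
    have hm : m ≤ t.length := by omega
    have hmt : m < t.length := by omega
    have hcast : (((m + 1 : Nat) : Int) + 1) = ((m : Int) + 1) + 1 := by push_cast; ring
    rw [hcast, PySem.List.pyRange_one_succ_right (by omega), List.foldl_append, ih hm,
      List.foldl_cons, List.foldl_nil]
    have hcast2 : ((m : Int) + 1) = (((m + 1 : Nat) : Nat) : Int) := by push_cast; ring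
    set P := pairs3 a (t.take m) with hP
    have hPfst : P.map (fun p => p.1) = (a :: t).take (m + 1) := by
      rw [hP, pairs3, foldl_step3_fst]
      simp [List.take_succ_cons]
    have hPlen : P.length = m + 1 := by
      rw [hP, pairs3, foldl_step3_len]
      simp [List.length_take, hm]
      omega
    have hdplen : ((P.map (fun p => p.2)) ++ List.replicate (t.length - m) (0 : Int)).length = t.length + 1 := by
      simp [hPlen]; omega
    rw [hcast2, A_inner (a :: t) (m + 1) _ _ (by rw [hdplen]; omega)
      (by intro j hj; rw [PySem.List.mem_pyRange_one] at hj; exact ⟨j.toNat, by omega, by omega⟩)]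
    -- x := value at index m+1 of (a :: t)
    have hx : PySem.List.pyGetD (a :: t) ((m + 1 : Nat) : Int) 0 = t[m] := by
      rw [PySem.List.pyGetD_natCast, List.getD_cons_succ, List.getD_eq_getElem _ _ hmt]
    -- the old cell value is 0
    have hold : PySem.List.pyGetD ((P.map (fun p => p.2)) ++ List.replicate (t.length - m) (0 : Int)) ((m + 1 : Nat) : Int) 0 = 0 := by
      rw [PySem.List.pyGetD_natCast, List.getD_append_right _ _ _ _ (by simp [hPlen]), List.length_map, hPlen]
      simp
    -- condition congruence: reads of (a :: t) below m+1 are reads of P.map (fun p => p.1)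
    have hcond : (PySem.List.pyRange 0 ((m + 1 : Nat) : Int) 1).filter
          (fun j => decide (|PySem.List.pyGetD (a :: t) ((m + 1 : Nat) : Int) 0 - PySem.List.pyGetD (a :: t) j 0| ≤ 3))
        = (PySem.List.pyRange 0 ((P.length : Nat) : Int) 1).filter
          (fun j => decide (|t[m] - PySem.List.pyGetD (P.map (fun p => p.1)) j 0| ≤ 3)) := by
      rw [hPlen, hx]
      apply List.filter_congr
      intro j hj
      rw [PySem.List.mem_pyRange_one] at hj
      have hj' : j = ((j.toNat : Nat) : Int) := by omega
      have hjm : j.toNat < m + 1 := by omega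
      rw [hj', PySem.List.pyGetD_natCast, PySem.List.pyGetD_natCast, hPfst]
      have hlt : j.toNat < ((a :: t).take (m + 1)).length := by
        simp [List.length_take]; omega
      rw [List.getD_eq_getElem _ _ hlt, List.getD_eq_getElem _ _ (by simp; omega), List.getElem_take]
    -- value congruence: dp reads below m+1 are reads of P.map (fun p => p.2)
    have hvals : ∀ j ∈ (PySem.List.pyRange 0 ((P.length : Nat) : Int) 1).filter
          (fun j => decide (|t[m] - PySem.List.pyGetD (P.map (fun p => p.1)) j 0| ≤ 3)),
        PySem.List.pyGetD ((P.map (fun p => p.2)) ++ List.replicate (t.length - m) (0 : Int)) j 0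
          = PySem.List.pyGetD (P.map (fun p => p.2)) j 0 := by
      intro j hj
      have hj2 := List.mem_of_mem_filter hj
      rw [PySem.List.mem_pyRange_one] at hj2
      have hj' : j = ((j.toNat : Nat) : Int) := by omega
      rw [hj', PySem.List.pyGetD_natCast, PySem.List.pyGetD_natCast,
        List.getD_append _ _ _ _ (by simp [hPlen]; omega)]
    rw [hcond, List.map_congr_left hvals, sum_idx P t[m], hold, zero_add]
    -- now perform the set and close with the model step
    have hrepl : List.replicate (t.length - m) (0 : Int) = 0 :: List.replicate (t.length - (m + 1)) 0 := by
      have : t.length - m = (t.length - (m + 1)) + 1 := by omega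
      rw [this, List.replicate_succ]
    rw [PySem.List.pySetD_of_nonneg _ _ (by positivity), Int.toNat_natCast, hrepl,
      List.set_append_right _ _ (by simp [hPlen]), List.length_map, hPlen, Nat.sub_self, List.set_cons_zero]
    have htake : t.take (m + 1) = t.take m ++ [t[m]] := by
      rw [List.take_add_one, List.getElem?_eq_getElem hmt]
      rfl
    rw [htake, pairs3, List.foldl_append, List.foldl_cons, List.foldl_nil]
    rw [show (t.take m).foldl step3 [(a, 1)] = P from rfl]
    rw [step3, List.map_append]
    simp

-- B's loop body (definitionally the lambda in total_3_chains_alt; named for the invariant proof)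
def bstep (st : PySem.Dict Int Int × Int) (x : Int) : PySem.Dict Int Int × Int :=
  let last : Int := ((PySem.List.pyRange (-3) 4 1).map (fun k => st.1.getD (x + k) 0)).sum
  (st.1.insert x (st.1.getD x 0 + last), last)

-- B's loop invariant: the dict holds g3 of the processed pairs, the running value the last dp.
theorem B_loop (t : List Int) :
    ∀ (L : List (Int × Int)) (s : PySem.Dict Int Int) (l : Int),
    (∀ v, s.getD v 0 = g3 L v) → l = lastDp L →
    (t.foldl bstep (s, l)).2 = lastDp (t.foldl step3 L) := by
  induction t with
  | nil =>
    intro L s l _ hl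
    simpa using hl
  | cons x t ih =>
    intro L s l hs hl
    simp only [List.foldl_cons]
    have hlast : ((PySem.List.pyRange (-3) 4 1).map (fun k => s.getD (x + k) 0)).sum = near3 L x :=
      sum7 L x _ hs
    refine ih (step3 L x) _ _ ?_ ?_
    · intro v
      show (s.insert x (s.getD x 0 + _)).getD v 0 = _
      rw [PySem.Dict.getD_insert, step3, g3_append_singleton]
      by_cases h : v = x
      · rw [if_pos h, if_pos (by simp [h]), hs, hlast, h]
      · rw [if_neg h, if_neg (by simp; omega), hs, add_zero]
    · show ((PySem.List.pyRange (-3) 4 1).map (fun k => s.getD (x + k) 0)).sum = _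
      rw [step3, lastDp_append, hlast]

-- ===== VERDICT (by name: the statement is the Claim_ definition above) =====
theorem total_3_chains_spec : Claim_equal_total_3_chains := by
  unfold Claim_equal_total_3_chains
  intro arr _ hpre
  unfold Spec_total_3_chains
  obtain ⟨a, t, rfl⟩ : ∃ a t, arr = a :: t := by
    cases arr with
    | nil => exact absurd rfl hpre
    | cons a t => exact ⟨a, t, rfl⟩
  show total_3_chains (a :: t) = total_3_chains_alt (a :: t)
  -- A side
  have hA : total_3_chains (a :: t) = lastDp (pairs3 a t) := by
    show PySem.List.pyGetD
        ((PySem.List.pyRange 1 (((a :: t).length : Nat) : Int) 1).foldl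
          (fun dp i => (PySem.List.pyRange 0 i 1).foldl
            (fun dp j => if |PySem.List.pyGetD (a :: t) i 0 - PySem.List.pyGetD (a :: t) j 0| ≤ 3 then
                PySem.List.pySetD dp i (PySem.List.pyGetD dp i 0 + PySem.List.pyGetD dp j 0) else dp) dp)
          (PySem.List.pySetD
            ((PySem.List.pyRange 0 (((a :: t).length : Nat) : Int) 1).map (fun _ => (0 : Int))) 0 1))
        (-1) 0 = lastDp (pairs3 a t)
    have hn : (((a :: t).length : Nat) : Int) = ((t.length : Nat) : Int) + 1 := by
      push_cast [List.length_cons]; ring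
    have hdp0 : (PySem.List.pyRange 0 (((a :: t).length : Nat) : Int) 1).map (fun _ => (0 : Int))
        = List.replicate (t.length + 1) 0 := by
      have : ∀ l : List Int, l.map (fun _ => (0 : Int)) = List.replicate l.length 0 := by
        intro l; induction l with
        | nil => simp
        | cons y l ih => simp [List.replicate_succ, ih]
      rw [this, PySem.List.length_pyRange_one]
      congr 1
    rw [hdp0]
    have hset : PySem.List.pySetD (List.replicate (t.length + 1) (0 : Int)) 0 1
        = 1 :: List.replicate t.length 0 := by
      rw [PySem.List.pySetD_of_nonneg _ _ (by norm_num), List.replicate_succ]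
      simp
    rw [hset, hn, A_outer a t t.length (le_refl _)]
    rw [List.take_length, Nat.sub_self, List.replicate_zero, List.append_nil]
    rfl
  -- B side
  have hB : total_3_chains_alt (a :: t) = lastDp (pairs3 a t) := by
    have ha0 : PySem.List.pyGetD (a :: t) 0 0 = a := by
      rw [show ((0 : Int)) = ((0 : Nat) : Int) from rfl, PySem.List.pyGetD_natCast]
      rfl
    have hslice : PySem.List.slice (a :: t) (some 1) none = t := by
      rw [PySem.List.slice_from_one]
      rfl
    have hinv1 : ∀ v, (PySem.Dict.empty.insert a 1).getD v (0 : Int) = g3 [(a, 1)] v := by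
      intro v
      rw [PySem.Dict.getD_insert, g3_cons]
      by_cases h : v = a
      · rw [if_pos h, if_pos (by omega), g3, List.filter_nil]
        simp
      · rw [if_neg h, if_neg (by omega), PySem.Dict.getD_empty, g3, List.filter_nil]
        simp
    have hinv2 : (1 : Int) = lastDp [(a, 1)] := by
      simp [lastDp, PySem.List.pyGetD, PySem.List.pyGet?, PySem.List.pyIdx?]
    have := B_loop t [(a, 1)] (PySem.Dict.empty.insert a 1) 1 hinv1 hinv2
    calc total_3_chains_alt (a :: t)
        = (t.foldl bstep (PySem.Dict.empty.insert a 1, 1)).2 := by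
          show ((PySem.List.slice (a :: t) (some 1) none).foldl _
            (PySem.Dict.empty.insert (PySem.List.pyGetD (a :: t) 0 0) 1, 1)).2 = _
          rw [hslice, ha0]
          rfl
      _ = lastDp (t.foldl step3 [(a, 1)]) := this
      _ = lastDp (pairs3 a t) := rfl
  rw [hA, hB]
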